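-- pv_equiv track=rewrite | github.com/Galahad3x/SAT-Solver-Race | solvers/reallysat.py | get_min_break
-- ===== SOURCE A (Python) =====
-- def get_min_break(unsat_clause, lit_to_clauses, clauses_sat_lit, num_clauses):
--     """Gets the variables that minimizes the break score."""
--     min_break = num_clauses
--     min_break_literals = []
--     for literal in unsat_clause:
--         current_break = 0
--         for clause_idx in lit_to_clauses[-literal]:  # satisfied clauses
--             # if current literal flips, this clause will go unsat
--             if clauses_sat_lit[clause_idx] == 1:
--                 current_break += 1
--         if current_break < min_break:
--             min_break = current_break
--             min_break_literals = [literal]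
--         elif current_break == min_break:
--             min_break_literals.append(literal)
--     return min_break_literals, min_break
-- ===== SOURCE B (Python) =====
-- def get_min_break(unsat_clause, lit_to_clauses, clauses_sat_lit, num_clauses):
--     """Gets the variables that minimizes the break score."""
--     scores = [(lit, sum(1 for i in lit_to_clauses[-lit] if clauses_sat_lit[i] == 1))
--               for lit in unsat_clause]
--     min_break = min([s for _, s in scores] + [num_clauses])
--     return [lit for lit, s in scores if s == min_break], min_break
-- ===== Notes on version B (the rewrite author's own statement) =====
-- stated objective: simpler
-- what changed: Replaced the streaming running-minimum with state resets by a table-then-reduce decomposition: build a score table once, take the minimum over scores plus num_clauses, then filter the literals attaining it.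
import Mathlib
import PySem

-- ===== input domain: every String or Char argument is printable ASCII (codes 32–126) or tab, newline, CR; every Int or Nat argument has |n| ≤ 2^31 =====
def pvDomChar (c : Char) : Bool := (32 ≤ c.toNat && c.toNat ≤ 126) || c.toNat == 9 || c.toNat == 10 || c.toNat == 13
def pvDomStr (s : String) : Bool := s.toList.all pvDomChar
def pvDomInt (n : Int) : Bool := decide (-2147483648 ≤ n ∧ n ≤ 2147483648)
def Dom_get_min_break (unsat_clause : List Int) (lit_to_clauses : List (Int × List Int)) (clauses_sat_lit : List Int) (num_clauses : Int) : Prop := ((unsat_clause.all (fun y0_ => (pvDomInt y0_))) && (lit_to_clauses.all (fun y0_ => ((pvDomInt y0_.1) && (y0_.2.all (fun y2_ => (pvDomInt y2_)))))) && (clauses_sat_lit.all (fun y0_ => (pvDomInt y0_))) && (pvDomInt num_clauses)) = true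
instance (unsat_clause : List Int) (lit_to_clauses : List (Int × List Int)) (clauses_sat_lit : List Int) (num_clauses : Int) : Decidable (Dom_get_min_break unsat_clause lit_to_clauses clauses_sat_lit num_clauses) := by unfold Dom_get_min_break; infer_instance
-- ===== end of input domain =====

-- B replaces A's streaming running-minimum (with list resets) by a table-then-reduce
-- decomposition (score table, min over scores plus num_clauses, filter); same cost, simpler.


-- ===== PORT A =====
-- Literal port of A's streaming loop; dict lookup / indexing use total getD forms,
-- exact on Pre_ (key present, indices in range).
def get_min_break (unsat_clause : List Int) (lit_to_clauses : List (Int × List Int)) (clauses_sat_lit : List Int) (num_clauses : Int) : List Int × Int :=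
  let r := unsat_clause.foldl (fun (st : Int × List Int) literal =>
      let current_break : Int := (PySem.Dict.getD (PySem.Dict.mk lit_to_clauses) (-literal) ([] : List Int)).foldl
          (fun acc clause_idx => if PySem.List.pyGetD clauses_sat_lit clause_idx 0 == 1 then acc + 1 else acc) 0
      if current_break < st.1 then (current_break, [literal])
      else if current_break == st.1 then (st.1, st.2 ++ [literal])
      else st) (num_clauses, ([] : List Int))
  (r.2, r.1)

-- ===== PORT B =====
def get_min_break_alt (unsat_clause : List Int) (lit_to_clauses : List (Int × List Int)) (clauses_sat_lit : List Int) (num_clauses : Int) : List Int × Int :=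
  let scores := unsat_clause.map (fun lit =>
      (lit, ((PySem.Dict.getD (PySem.Dict.mk lit_to_clauses) (-lit) ([] : List Int)).countP
               (fun i => PySem.List.pyGetD clauses_sat_lit i 0 == 1) : Int)))
  -- min([...] + [num_clauses]): the list is nonempty, so min? is always some; getD 0 is never used
  let min_break := (PySem.List.min? (scores.map (·.2) ++ [num_clauses]) (fun x => x)).getD 0
  ((scores.filter (fun p => p.2 == min_break)).map (·.1), min_break)

-- ===== PRECONDITION & SPEC =====
-- Pre_ excludes exactly the inputs where Python A raises: a KeyError when some -literal is
-- missing from lit_to_clauses, or an IndexError when a listed clause index is out of range.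
def Pre_get_min_break (unsat_clause : List Int) (lit_to_clauses : List (Int × List Int)) (clauses_sat_lit : List Int) (num_clauses : Int) : Prop :=
  ∀ lit ∈ unsat_clause, PySem.Dict.contains (PySem.Dict.mk lit_to_clauses) (-lit) = true ∧
    ∀ i ∈ PySem.Dict.getD (PySem.Dict.mk lit_to_clauses) (-lit) ([] : List Int), PySem.Raise.InRange clauses_sat_lit.length i
instance (unsat_clause : List Int) (lit_to_clauses : List (Int × List Int)) (clauses_sat_lit : List Int) (num_clauses : Int) : Decidable (Pre_get_min_break unsat_clause lit_to_clauses clauses_sat_lit num_clauses) := by unfold Pre_get_min_break; infer_instance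
def pvWitness_get_min_break : List Int × (List (Int × List Int)) × List Int × Int :=
  ([1, -1], [(-1, [0]), (1, [1])], [1, 0], 2)
def Spec_get_min_break (unsat_clause : List Int) (lit_to_clauses : List (Int × List Int)) (clauses_sat_lit : List Int) (num_clauses : Int) (out : List Int × Int) : Prop := out = get_min_break_alt unsat_clause lit_to_clauses clauses_sat_lit num_clauses
instance (unsat_clause : List Int) (lit_to_clauses : List (Int × List Int)) (clauses_sat_lit : List Int) (num_clauses : Int) (out : List Int × Int) : Decidable (Spec_get_min_break unsat_clause lit_to_clauses clauses_sat_lit num_clauses out) := by unfold Spec_get_min_break; infer_instance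

-- ===== CLAIM (what is proved, stated in full; the proofs are below) =====
def Claim_equal_get_min_break : Prop := ∀ (unsat_clause : List Int) (lit_to_clauses : List (Int × List Int)) (clauses_sat_lit : List Int) (num_clauses : Int), Dom_get_min_break unsat_clause lit_to_clauses clauses_sat_lit num_clauses → Pre_get_min_break unsat_clause lit_to_clauses clauses_sat_lit num_clauses → Spec_get_min_break unsat_clause lit_to_clauses clauses_sat_lit num_clauses (get_min_break unsat_clause lit_to_clauses clauses_sat_lit num_clauses)

-- ===== LEMMAS AND PROOFS =====
lemma pv_foldl_min_le (xs : List Int) : ∀ m : Int, xs.foldl min m ≤ m := by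
  induction xs with
  | nil => intro m; simp
  | cons x xs ih =>
      intro m
      calc (x :: xs).foldl min m = xs.foldl min (min m x) := rfl
        _ ≤ min m x := ih _
        _ ≤ m := min_le_left _ _

lemma pv_foldl_min_append (xs : List Int) : ∀ (a b : Int), (xs ++ [b]).foldl min a = xs.foldl min (min a b) := by
  induction xs with
  | nil => intro a b; simp
  | cons x xs ih =>
      intro a b
      show (xs ++ [b]).foldl min (min a x) = xs.foldl min (min (min a b) x)
      rw [ih]
      congr 1
      omega

lemma pv_min?_append_singleton (xs : List Int) (n : Int) :
    (PySem.List.min? (xs ++ [n]) (fun x => x)).getD 0 = xs.foldl min n := by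
  cases xs with
  | nil => simp [PySem.List.min?_id_cons]
  | cons x xs =>
      rw [List.cons_append, PySem.List.min?_id_cons, Option.getD_some, pv_foldl_min_append]
      induction xs generalizing x n with
      | nil => simp [min_comm]
      | cons y ys ih =>
          show ys.foldl min (min (min x n) y) = ys.foldl min (min (min n x) y)
          congr 1
          omega

-- A's loop, with the score abstracted as f, equals "global min + filter".
lemma pv_loopA_gen (f : Int → Int) : ∀ (L : List Int) (m : Int) (acc : List Int),
    L.foldl (fun (st : Int × List Int) l =>
        if f l < st.1 then (f l, [l])
        else if f l == st.1 then (st.1, st.2 ++ [l])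
        else st) (m, acc)
    = ((L.map f).foldl min m,
       (if (L.map f).foldl min m = m then acc else []) ++ L.filter (fun l => f l == (L.map f).foldl min m)) := by
  intro L
  induction L with
  | nil => intro m acc; simp
  | cons l L ih =>
      intro m acc
      simp only [List.foldl_cons, List.map_cons, List.filter_cons]
      by_cases h1 : f l < m
      · rw [if_pos h1, ih]
        have hmin : min m (f l) = f l := by omega
        have hle : (L.map f).foldl min (f l) ≤ f l := pv_foldl_min_le _ _
        simp only [hmin]
        by_cases h2 : (L.map f).foldl min (f l) = f l
        · simp [h2]
          omega
        · have hne : ¬ ((f l == (L.map f).foldl min (f l)) = true) := by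
            simp [beq_iff_eq]; omega
          simp [h2, hne]
          omega
      · rw [if_neg h1]
        by_cases h2 : f l = m
        · rw [if_pos (by simp [h2]), ih]
          simp only [h2, min_self]
          by_cases h3 : (L.map f).foldl min m = m
          · simp [h3]
          · have hne : ¬ ((m == (L.map f).foldl min m) = true) := by
              simp [beq_iff_eq]; omega
            simp [h3, hne]
        · rw [if_neg (by simp [h2]), ih]
          have hmin : min m (f l) = m := by omega
          have hle : (L.map f).foldl min m ≤ m := pv_foldl_min_le _ _
          simp only [hmin]
          have hne : ¬ ((f l == (L.map f).foldl min m) = true) := by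
            simp [beq_iff_eq]; omega
          simp [hne]

-- ===== VERDICT (by name: the statement is the Claim_ definition above) =====
theorem get_min_break_spec : Claim_equal_get_min_break := by
  intro u ltc csl n _ _
  unfold Spec_get_min_break get_min_break get_min_break_alt
  have hstep : (fun (st : Int × List Int) literal =>
      let current_break : Int := (PySem.Dict.getD (PySem.Dict.mk ltc) (-literal) ([] : List Int)).foldl
          (fun acc clause_idx => if PySem.List.pyGetD csl clause_idx 0 == 1 then acc + 1 else acc) 0
      if current_break < st.1 then (current_break, [literal])
      else if current_break == st.1 then (st.1, st.2 ++ [literal])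
      else st)
      = (fun (st : Int × List Int) l =>
        if (((PySem.Dict.getD (PySem.Dict.mk ltc) (-l) ([] : List Int)).countP
              (fun i => PySem.List.pyGetD csl i 0 == 1) : Int)) < st.1 then
          ((((PySem.Dict.getD (PySem.Dict.mk ltc) (-l) ([] : List Int)).countP
              (fun i => PySem.List.pyGetD csl i 0 == 1) : Int)), [l])
        else if (((PySem.Dict.getD (PySem.Dict.mk ltc) (-l) ([] : List Int)).countP
              (fun i => PySem.List.pyGetD csl i 0 == 1) : Int)) == st.1 then (st.1, st.2 ++ [l])
        else st) := by
    funext st l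
    rw [PySem.List.foldl_if_add_one]
    simp
  rw [hstep, pv_loopA_gen (fun l => (((PySem.Dict.getD (PySem.Dict.mk ltc) (-l) ([] : List Int)).countP
        (fun i => PySem.List.pyGetD csl i 0 == 1) : Int))) u n []]
  dsimp only
  rw [List.map_map]
  have hcomp : ((fun (x : Int × Int) => x.2) ∘ fun lit =>
      (lit, (((PySem.Dict.getD (PySem.Dict.mk ltc) (-lit) ([] : List Int)).countP
        (fun i => PySem.List.pyGetD csl i 0 == 1) : Int))))
      = (fun l => (((PySem.Dict.getD (PySem.Dict.mk ltc) (-l) ([] : List Int)).countP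
        (fun i => PySem.List.pyGetD csl i 0 == 1) : Int))) := rfl
  rw [hcomp, pv_min?_append_singleton]
  refine Prod.ext ?_ rfl
  simp [List.filter_map, Function.comp_def, ite_self]
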